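-- pv_equiv track=rewrite | github.com/amelia-cook/IoT-Project | incremental/numstickies.py | parse
-- ===== SOURCE A (Python) =====
-- def parse(text, size):
--     #parsing through the text, after 35 characters or a new line character it puts the rest of the string in the next element of the array
--     max_length=45
--     result = []
--     current = ""
--
--     for char in text:
--         current += char
--         if len(current) >= max_length or char == '\n':
--             result.append(current.strip())
--             current = ""
--
--     if current:
--         result.append(current.strip())
--
--     while len(result) < size:
--         result.append(" ")
--
--     return result
-- ===== SOURCE B (Python) =====
-- def parse(text, size):
--     # Slice-based scan: find the next newline, cut at it (or at 45 chars), strip the slice.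
--     max_length = 45
--     result = []
--     rest = text
--     while rest:
--         nl = rest.find('\n')
--         j = nl + 1 if 0 <= nl < max_length else min(max_length, len(rest))
--         result.append(rest[:j].strip())
--         rest = rest[j:]
--     if len(result) < size:
--         result += [" "] * (size - len(result))
--     return result
-- ===== Notes on version B (the rewrite author's own statement) =====
-- stated objective: simpler
-- what changed: Chunk boundaries are located by a newline search plus slicing on the remaining suffix (find '\n', cut at it or at 45 chars, strip the slice) instead of accumulating characters one at a time, and the padding while-loop becomes a single list-replication append.
import Mathlib
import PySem

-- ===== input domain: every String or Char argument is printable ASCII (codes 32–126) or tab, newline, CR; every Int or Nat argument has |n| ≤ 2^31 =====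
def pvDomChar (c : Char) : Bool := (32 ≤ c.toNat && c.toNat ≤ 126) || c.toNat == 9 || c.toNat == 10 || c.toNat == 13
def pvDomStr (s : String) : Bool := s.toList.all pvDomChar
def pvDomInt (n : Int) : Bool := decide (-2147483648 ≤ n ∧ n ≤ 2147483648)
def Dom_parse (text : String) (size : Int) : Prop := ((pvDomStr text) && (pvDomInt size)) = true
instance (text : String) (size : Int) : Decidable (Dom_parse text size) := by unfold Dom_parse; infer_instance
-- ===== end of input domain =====

-- B replaces A's char-by-char accumulator loop with a find-newline-and-slice scan (objective: simpler decomposition, same cost).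

-- ===== PORT A =====
-- one step of A's 'for char in text' loop; state = (result, current), current kept as List Char
def parseStepA (st : List String × List Char) (c : Char) : List String × List Char :=
  let cur := st.2 ++ [c]
  if 45 ≤ cur.length ∨ c = '\n' then
    (st.1 ++ [String.ofList (PySem.Chars.strip cur)], [])
  else
    (st.1, cur)

-- A's trailing 'while len(result) < size: result.append(" ")'; fuel only makes the loop total
def parsePadAGo (size : Int) : Nat → List String → List String
  | 0, r => r
  | fuel + 1, r => if (r.length : Int) < size then parsePadAGo size fuel (r ++ [" "]) else r

def parsePadA (r : List String) (size : Int) : List String :=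
  parsePadAGo size (size - (r.length : Int)).toNat r

def parse (text : String) (size : Int) : List String :=
  let st := text.toList.foldl parseStepA ([], [])
  let r := if st.2 ≠ [] then st.1 ++ [String.ofList (PySem.Chars.strip st.2)] else st.1
  parsePadA r size

-- ===== PORT B =====
-- B's 'nl = rest.find('\n'); j = nl + 1 if 0 <= nl < max_length else min(max_length, len(rest))'
def parseCutB (rest : List Char) : Nat :=
  if 0 ≤ PySem.Chars.find rest ['\n'] ∧ PySem.Chars.find rest ['\n'] < 45 then
    (PySem.Chars.find rest ['\n']).toNat + 1
  else
    min 45 rest.length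

-- B's 'while rest:' loop; rest[:j].strip() appended, rest = rest[j:]; fuel only makes the loop total
def parseChunksBGo : Nat → List Char → List String
  | 0, _ => []
  | fuel + 1, rest =>
      if rest = [] then []
      else
        String.ofList (PySem.Chars.strip (rest.take (parseCutB rest))) ::
          parseChunksBGo fuel (rest.drop (parseCutB rest))

def parseChunksB (rest : List Char) : List String :=
  parseChunksBGo rest.length rest

def parse_alt (text : String) (size : Int) : List String :=
  let r := parseChunksB text.toList
  if (r.length : Int) < size then r ++ List.replicate (size - r.length).toNat " " else r

-- ===== PRECONDITION & SPEC =====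
def Spec_parse (text : String) (size : Int) (out : List String) : Prop := out = parse_alt text size
instance (text : String) (size : Int) (out : List String) : Decidable (Spec_parse text size out) := by unfold Spec_parse; infer_instance

-- ===== CLAIM (what is proved, stated in full; the proofs are below) =====
def Claim_equal_parse : Prop := ∀ (text : String) (size : Int), Dom_parse text size → Spec_parse text size (parse text size)

-- ===== LEMMAS AND PROOFS =====

-- [a] is a prefix of l.drop j exactly when l[j]? = some a
theorem pv_singleton_prefix_drop (a : Char) (l : List Char) (j : Nat) :
    [a] <+: l.drop j ↔ l[j]? = some a := by
  have hg : l[j]? = (l.drop j)[0]? := by simp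
  cases h : l.drop j with
  | nil => simp [hg, h]
  | cons x xs =>
      rw [hg, h]
      constructor
      · rintro ⟨t, ht⟩
        simp at ht
        simp [ht.1]
      · intro hx
        simp at hx
        exact ⟨xs, by simp [hx]⟩

-- find of '\n' is -1 when '\n' does not occur
theorem pv_find_nl_none (l : List Char) (h : '\n' ∉ l) :
    PySem.Chars.find l ['\n'] = -1 := by
  rw [PySem.Chars.find_eq_neg_one_iff]
  intro hinf
  exact h ((List.singleton_infix_iff '\n' l).mp hinf)

-- if find lands at index k then l[k] = '\n'
theorem pv_find_nl_at (l : List Char) (h : 0 ≤ PySem.Chars.find l ['\n']) :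
    l[(PySem.Chars.find l ['\n']).toNat]? = some '\n' := by
  obtain ⟨hpre, -⟩ := PySem.Chars.find_spec (s := l) (sub := ['\n']) h
  exact (pv_singleton_prefix_drop '\n' l _).mp hpre

-- find of '\n' on cur ++ '\n' :: rest with no '\n' in cur is |cur|
theorem pv_find_nl_exact (cur rest : List Char) (h : '\n' ∉ cur) :
    PySem.Chars.find (cur ++ '\n' :: rest) ['\n'] = (cur.length : Int) := by
  have hat : (cur ++ '\n' :: rest)[cur.length]? = some '\n' := by
    rw [List.getElem?_append_right (le_refl _)]
    simp
  have hmem : '\n' ∈ cur ++ '\n' :: rest := by simp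
  have hpos : 0 ≤ PySem.Chars.find (cur ++ '\n' :: rest) ['\n'] := by
    rw [PySem.Chars.find_nonneg_iff]
    exact (List.singleton_infix_iff '\n' _).mpr hmem
  obtain ⟨hpre, hmin⟩ := PySem.Chars.find_spec (s := cur ++ '\n' :: rest) (sub := ['\n']) hpos
  have hle : (PySem.Chars.find (cur ++ '\n' :: rest) ['\n']).toNat ≤ cur.length := by
    by_contra hlt
    exact hmin cur.length (by omega) ((pv_singleton_prefix_drop '\n' _ cur.length).mpr hat)
  have hfound := pv_find_nl_at (cur ++ '\n' :: rest) hpos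
  rcases Nat.lt_or_ge (PySem.Chars.find (cur ++ '\n' :: rest) ['\n']).toNat cur.length with hlt | _
  · exfalso
    rw [List.getElem?_append_left hlt] at hfound
    exact h (List.mem_of_getElem? hfound)
  · omega

-- when the chunk boundary triggers, B's cut on the whole suffix is |cur| + 1
theorem pv_cut_trigger (cur : List Char) (c : Char) (rest : List Char)
    (hlen : cur.length < 45) (hnl : '\n' ∉ cur)
    (htrig : 45 ≤ cur.length + 1 ∨ c = '\n') :
    parseCutB (cur ++ c :: rest) = cur.length + 1 := by
  by_cases hcn : c = '\n'
  · subst hcn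
    unfold parseCutB
    rw [pv_find_nl_exact cur rest hnl]
    rw [if_pos (by constructor <;> omega)]
    omega
  · have h44 : cur.length = 44 := by
      rcases htrig with h45 | hc
      · omega
      · exact absurd hc hcn
    unfold parseCutB
    have hfind : ¬ (0 ≤ PySem.Chars.find (cur ++ c :: rest) ['\n'] ∧
        PySem.Chars.find (cur ++ c :: rest) ['\n'] < 45) := by
      rintro ⟨hge, hlt45⟩
      have hat := pv_find_nl_at (cur ++ c :: rest) hge
      set k := (PySem.Chars.find (cur ++ c :: rest) ['\n']).toNat with hk
      have hk45 : k < 45 := by omega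
      rcases Nat.lt_or_ge k cur.length with hlt | hge'
      · rw [List.getElem?_append_left hlt] at hat
        exact hnl (List.mem_of_getElem? hat)
      · have hkc : k = cur.length := by omega
        rw [hkc, List.getElem?_append_right (le_refl _)] at hat
        simp at hat
        exact hcn hat
    rw [if_neg hfind]
    have : (cur ++ c :: rest).length = 45 + rest.length := by simp; omega
    omega

-- the fuel only needs to dominate the suffix length
theorem pv_chunksBGo_fuel : ∀ (f1 f2 : Nat) (rest : List Char),
    rest.length ≤ f1 → rest.length ≤ f2 → parseChunksBGo f1 rest = parseChunksBGo f2 rest := by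
  intro f1
  induction f1 with
  | zero =>
      intro f2 rest h1 _
      have : rest = [] := List.eq_nil_of_length_eq_zero (by omega)
      subst this
      cases f2 <;> simp [parseChunksBGo]
  | succ k ih =>
      intro f2 rest h1 h2
      by_cases hr : rest = []
      · subst hr
        cases f2 <;> simp [parseChunksBGo]
      · have hlen : 1 ≤ rest.length := by
          cases rest with
          | nil => exact absurd rfl hr
          | cons a l => simp
        cases f2 with
        | zero => omega
        | succ m =>
            simp only [parseChunksBGo, if_neg hr]
            have hcut : 1 ≤ parseCutB rest := by
              unfold parseCutB
              split
              · omega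
              · omega
            have hd : (rest.drop (parseCutB rest)).length ≤ k := by
              simp only [List.length_drop]
              omega
            have hd2 : (rest.drop (parseCutB rest)).length ≤ m := by
              simp only [List.length_drop]
              omega
            rw [ih m _ hd hd2]

-- one unfolding step of chunksB when the boundary triggers at cur ++ [c]
theorem pv_chunksB_step (cur : List Char) (c : Char) (rest : List Char)
    (hlen : cur.length < 45) (hnl : '\n' ∉ cur)
    (htrig : 45 ≤ cur.length + 1 ∨ c = '\n') :
    parseChunksB (cur ++ c :: rest) =
      String.ofList (PySem.Chars.strip (cur ++ [c])) :: parseChunksB rest := by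
  have hne : cur ++ c :: rest ≠ [] := by simp
  have hlentot : (cur ++ c :: rest).length = cur.length + 1 + rest.length := by simp; omega
  unfold parseChunksB
  rw [hlentot]
  have hsucc : cur.length + 1 + rest.length = (cur.length + rest.length) + 1 := by omega
  rw [hsucc]
  simp only [parseChunksBGo, if_neg hne]
  rw [pv_cut_trigger cur c rest hlen hnl htrig]
  have hsplit : cur ++ c :: rest = (cur ++ [c]) ++ rest := by simp
  rw [hsplit]
  have hlen1 : (cur ++ [c]).length = cur.length + 1 := by simp
  rw [List.take_append_of_le_length (by omega), List.drop_append_of_le_length (by omega)]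
  rw [List.take_of_length_le (le_of_eq hlen1)]
  rw [List.drop_of_length_le (le_of_eq hlen1)]
  simp only [List.nil_append]
  rw [pv_chunksBGo_fuel (cur.length + rest.length) rest.length rest (by omega) (by omega)]

-- A's finalize ('if current: result.append(current.strip())') on the loop state
def pvFinalize (st : List String × List Char) : List String :=
  if st.2 ≠ [] then st.1 ++ [String.ofList (PySem.Chars.strip st.2)] else st.1

-- main invariant: A's loop from state (r, cur) computes r ++ B's chunks of cur ++ cs
theorem pv_loop_eq (cs : List Char) : ∀ (cur : List Char) (r : List String),
    cur.length < 45 → '\n' ∉ cur →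
    pvFinalize (cs.foldl parseStepA (r, cur)) = r ++ parseChunksB (cur ++ cs) := by
  induction cs with
  | nil =>
      intro cur r hlen hnl
      rw [List.foldl_nil, List.append_nil]
      by_cases hc : cur = []
      · subst hc
        simp [pvFinalize, parseChunksB, parseChunksBGo]
      · have hcut : parseCutB cur = cur.length := by
          unfold parseCutB
          rw [pv_find_nl_none cur hnl]
          rw [if_neg (by omega)]
          omega
        unfold pvFinalize
        rw [if_pos (by simpa using hc)]
        have hlen1 : 1 ≤ cur.length := by
          cases cur with
          | nil => exact absurd rfl hc
          | cons a l => simp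
        unfold parseChunksB
        have : cur.length = (cur.length - 1) + 1 := by omega
        rw [this]
        simp only [parseChunksBGo, if_neg hc]
        rw [hcut]
        cases hn : cur.length - 1 <;> simp [parseChunksBGo]
  | cons c cs ih =>
      intro cur r hlen hnl
      rw [List.foldl_cons]
      by_cases htrig : 45 ≤ cur.length + 1 ∨ c = '\n'
      · have hstep : parseStepA (r, cur) c =
            (r ++ [String.ofList (PySem.Chars.strip (cur ++ [c]))], []) := by
          unfold parseStepA
          rw [if_pos (by simpa using htrig)]
        rw [hstep, ih [] _ (by simp) (by simp)]
        rw [pv_chunksB_step cur c cs hlen hnl htrig]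
        simp
      · have hstep : parseStepA (r, cur) c = (r, cur ++ [c]) := by
          unfold parseStepA
          rw [if_neg (by simpa using htrig)]
        simp only [not_or, not_le] at htrig
        have hnl' : '\n' ∉ cur ++ [c] := by
          simp
          exact ⟨hnl, fun h => htrig.2 h.symm⟩
        rw [hstep, ih (cur ++ [c]) r (by simp; omega) hnl']
        simp

-- A's padding loop appends exactly (size - len).toNat copies of " "
theorem pv_pad_eq (size : Int) : ∀ (n : Nat) (r : List String),
    (size - (r.length : Int)).toNat = n → parsePadAGo size n r = r ++ List.replicate n " " := by
  intro n
  induction n with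
  | zero =>
      intro r _
      simp [parsePadAGo]
  | succ k ihk =>
      intro r hn
      simp only [parsePadAGo]
      rw [if_pos (by omega)]
      rw [ihk (r ++ [" "]) (by simp; omega)]
      simp [List.replicate_succ]

-- ===== VERDICT (by name: the statement is the Claim_ definition above) =====
theorem parse_spec : Claim_equal_parse := by
  intro text size _
  unfold Spec_parse
  simp only [parse, parse_alt]
  have hloop := pv_loop_eq text.toList [] [] (by simp) (by simp)
  unfold pvFinalize at hloop
  simp only [List.nil_append] at hloop
  rw [hloop]
  unfold parsePadA
  rw [pv_pad_eq size ((size - ((parseChunksB text.toList).length : Int)).toNat) _ rfl]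
  by_cases hlt : ((parseChunksB text.toList).length : Int) < size
  · rw [if_pos hlt]
  · rw [if_neg hlt]
    have h0 : (size - ((parseChunksB text.toList).length : Int)).toNat = 0 := by omega
    rw [h0]
    simp
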